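-- pv_equiv track=rewrite | github.com/Prevalex/Tables | tLib.py | get_array_keys
-- ===== SOURCE A (Python) =====
-- def get_array_keys(dic_array):
--     key_array = []
--     key_list = list(dic_array[0].keys())
--     for row_dic in dic_array:
--         key_array.append(list(row_dic.keys()))
--     if all([set(row) == set(key_list) for row in key_array]):
--         return key_list
--     else:
--         return []
-- ===== SOURCE B (Python) =====
-- def get_array_keys(dic_array):
--     key_list = list(dic_array[0].keys())
--     counts = {}
--     for row_dic in dic_array:
--         for k in row_dic.keys():
--             counts[k] = counts.get(k, 0) + 1
--     n = len(dic_array)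
--     if all(v == n for v in counts.values()):
--         return key_list
--     return []
-- ===== Notes on version B (the rewrite author's own statement) =====
-- stated objective: alternative
-- what changed: Instead of materialising every row's key list and comparing each to the first row's key set, B builds one global histogram counting in how many dicts each key occurs and returns the first dict's keys iff every count equals the number of dicts.
import Mathlib
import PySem

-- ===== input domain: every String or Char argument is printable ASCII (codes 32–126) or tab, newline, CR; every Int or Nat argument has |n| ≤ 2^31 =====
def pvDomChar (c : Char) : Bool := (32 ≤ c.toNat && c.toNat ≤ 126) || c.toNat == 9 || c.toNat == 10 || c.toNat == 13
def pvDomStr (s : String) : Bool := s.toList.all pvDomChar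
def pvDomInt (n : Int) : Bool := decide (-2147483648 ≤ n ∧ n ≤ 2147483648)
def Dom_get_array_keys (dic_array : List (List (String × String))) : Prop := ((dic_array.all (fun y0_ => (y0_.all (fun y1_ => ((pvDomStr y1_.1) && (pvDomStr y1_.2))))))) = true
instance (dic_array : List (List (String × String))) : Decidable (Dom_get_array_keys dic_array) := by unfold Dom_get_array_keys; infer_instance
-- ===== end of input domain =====

-- B replaces A's per-row set comparisons against the first row by one global histogram:
-- it counts in how many dicts each key occurs and succeeds iff every count equals the
-- number of dicts (alternative decomposition, same cost).

-- list(d.keys()) for a dict encoded as an association list: first occurrence of each key, in order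
def rowKeys (row : List (String × String)) : List String :=
  PySem.Set.ofList (row.map Prod.fst)

-- ===== PORT A =====
def get_array_keys (dic_array : List (List (String × String))) : List String :=
  let key_array : List (List String) := []
  match PySem.List.pyGet? dic_array 0 with
  | none => []   -- IndexError on dic_array[0]; excluded by Pre_
  | some first =>
    let key_list := rowKeys first
    let key_array := dic_array.foldl (fun acc row_dic => acc ++ [rowKeys row_dic]) key_array
    if (key_array.map (fun row =>
          PySem.Set.equal (PySem.Set.ofList row) (PySem.Set.ofList key_list))).all id
    then key_list
    else []

-- ===== PORT B =====
def get_array_keys_alt (dic_array : List (List (String × String))) : List String :=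
  match PySem.List.pyGet? dic_array 0 with
  | none => []   -- IndexError on dic_array[0]; B raises there too; excluded by Pre_
  | some first =>
    let key_list := rowKeys first
    let counts : PySem.Dict String Int :=
      dic_array.foldl (fun c row_dic =>
        (rowKeys row_dic).foldl (fun c k => c.insert k (c.getD k 0 + 1)) c) PySem.Dict.empty
    let n : Int := PySem.List.len dic_array
    if (counts.values.all (fun v => v == n)) then key_list else []

-- ===== PRECONDITION & SPEC =====
-- Python A raises IndexError on the empty list (dic_array[0]); B raises there too.
def Pre_get_array_keys (dic_array : List (List (String × String))) : Prop := dic_array ≠ []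
instance (dic_array : List (List (String × String))) : Decidable (Pre_get_array_keys dic_array) := by
  unfold Pre_get_array_keys; infer_instance

def pvWitness_get_array_keys : (List (List (String × String))) := [[("a", "1"), ("b", "2")]]

def Spec_get_array_keys (dic_array : List (List (String × String))) (out : List String) : Prop := out = get_array_keys_alt dic_array
instance (dic_array : List (List (String × String))) (out : List String) : Decidable (Spec_get_array_keys dic_array out) := by unfold Spec_get_array_keys; infer_instance

-- ===== CLAIM (what is proved, stated in full; the proofs are below) =====
def Claim_equal_get_array_keys : Prop := ∀ (dic_array : List (List (String × String))), Dom_get_array_keys dic_array → Pre_get_array_keys dic_array → Spec_get_array_keys dic_array (get_array_keys dic_array)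

-- ===== LEMMAS AND PROOFS =====

-- rowKeys is duplicate-free
theorem nodup_rowKeys (row : List (String × String)) : (rowKeys row).Nodup :=
  PySem.Set.nodup_ofList _

-- so set(rowKeys d) = rowKeys d
theorem ofList_rowKeys (row : List (String × String)) :
    PySem.Set.ofList (rowKeys row) = rowKeys row :=
  PySem.Set.ofList_eq_self_of_nodup _ (nodup_rowKeys row)

-- the per-row key counts of a list of duplicate-free rows sum to at most the number of rows
theorem sum_count_le (k : String) (l : List (List String)) (h : ∀ r ∈ l, r.Nodup) :
    (l.map (fun r => r.count k)).sum ≤ l.length := by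
  induction l with
  | nil => simp
  | cons r rs ih =>
    have h1 : r.count k ≤ 1 :=
      List.nodup_iff_count_le_one.mp (h r (by simp)) k
    have h2 := ih (fun r' hr' => h r' (by simp [hr']))
    simp only [List.map_cons, List.sum_cons, List.length_cons]
    omega

-- ... and reach exactly that number iff the key occurs in every row
theorem sum_count_eq_iff (k : String) (l : List (List String)) (h : ∀ r ∈ l, r.Nodup) :
    ((l.map (fun r => r.count k)).sum = l.length) ↔ ∀ r ∈ l, k ∈ r := by
  induction l with
  | nil => simp
  | cons r rs ih =>
    have h1 : r.count k ≤ 1 :=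
      List.nodup_iff_count_le_one.mp (h r (by simp)) k
    have h2 := sum_count_le k rs (fun r' hr' => h r' (by simp [hr']))
    have h3 := ih (fun r' hr' => h r' (by simp [hr']))
    simp only [List.map_cons, List.sum_cons, List.length_cons, List.mem_cons]
    constructor
    · intro heq
      have hr1 : r.count k = 1 := by omega
      have hrs : (rs.map (fun r => r.count k)).sum = rs.length := by omega
      have hk : k ∈ r := List.count_pos_iff.mp (by omega)
      exact fun r' hr' => hr'.elim (fun e => e ▸ hk) (h3.mp hrs r')
    · intro hall
      have hk : r.count k = 1 := by
        have := List.count_pos_iff.mpr (hall r (Or.inl rfl))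
        omega
      have hrs : (rs.map (fun r => r.count k)).sum = rs.length :=
        h3.mpr (fun r' hr' => hall r' (Or.inr hr'))
      omega

-- B's histogram condition ↔ every row has the same key membership as the first row
theorem counts_iff (r0 : List String) (rs : List (List String))
    (h : ∀ r ∈ r0 :: rs, r.Nodup) :
    (∀ k ∈ (r0 :: rs).flatten, ((r0 :: rs).flatten).count k = rs.length + 1) ↔
      (∀ r ∈ rs, ∀ x, x ∈ r ↔ x ∈ r0) := by
  have hcnt : ∀ k, ((r0 :: rs).flatten).count k = (((r0 :: rs)).map (fun r => r.count k)).sum := by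
    intro k
    simp [List.count_flatten]
  have hlen : (r0 :: rs).length = rs.length + 1 := by simp
  constructor
  · intro H r hr x
    constructor
    · intro hx
      have hmem : x ∈ (r0 :: rs).flatten := List.mem_flatten.mpr ⟨r, by simp [hr], hx⟩
      have := (sum_count_eq_iff x (r0 :: rs) h).mp (by rw [← hcnt, H x hmem, hlen])
      exact this r0 (by simp)
    · intro hx
      have hmem : x ∈ (r0 :: rs).flatten := List.mem_flatten.mpr ⟨r0, by simp, hx⟩
      have := (sum_count_eq_iff x (r0 :: rs) h).mp (by rw [← hcnt, H x hmem, hlen])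
      exact this r (by simp [hr])
  · intro H k hk
    rcases List.mem_flatten.mp hk with ⟨r, hr, hkr⟩
    have hk0 : k ∈ r0 := by
      rcases List.mem_cons.mp hr with e | hr'
      · exact e ▸ hkr
      · exact (H r hr' k).mp hkr
    have hall : ∀ r' ∈ r0 :: rs, k ∈ r' := by
      intro r' hr'
      rcases List.mem_cons.mp hr' with e | hr''
      · exact e ▸ hk0
      · exact (H r' hr'' k).mpr hk0
    rw [hcnt, (sum_count_eq_iff k (r0 :: rs) h).mpr hall, hlen]

-- B's counter is Counter of the concatenation of all rows' key lists
theorem counts_eq_counter (dic_array : List (List (String × String))) :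
    dic_array.foldl (fun c row_dic =>
        (rowKeys row_dic).foldl (fun c k => c.insert k (c.getD k 0 + 1)) c) PySem.Dict.empty
      = PySem.Dict.counter ((dic_array.map rowKeys).flatten) := by
  rw [← PySem.Dict.foldl_insert_getD_add_one_eq_counter, List.foldl_flatten, List.foldl_map]

-- ===== VERDICT (by name: the statement is the Claim_ definition above) =====
theorem get_array_keys_spec : Claim_equal_get_array_keys := by
  intro dic_array _ hpre
  unfold Spec_get_array_keys get_array_keys get_array_keys_alt
  cases dic_array with
  | nil => exact absurd rfl hpre
  | cons first rest =>
    simp only [PySem.List.pyGet?_zero_cons]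
    rw [PySem.List.foldl_append_singleton_eq_map, counts_eq_counter, List.nil_append]
    -- set up both Boolean conditions as Props
    have hnodup : ∀ r ∈ (first :: rest).map rowKeys, r.Nodup := by
      intro r hr
      rcases List.mem_map.mp hr with ⟨d, _, rfl⟩
      exact nodup_rowKeys d
    -- B's condition as a Prop
    have hB : ((PySem.Dict.counter (((first :: rest).map rowKeys).flatten)).values.all
          (fun v => v == PySem.List.len (first :: rest))) = true ↔
        (∀ k ∈ ((first :: rest).map rowKeys).flatten,
            (((first :: rest).map rowKeys).flatten).count k = rest.length + 1) := by
      rw [PySem.Dict.values_eq_map_keys _ (PySem.Dict.nodup_keys_counter _) (0 : Int),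
        PySem.Dict.keys_counter]
      simp only [List.all_eq_true, List.mem_map, PySem.Dict.getD_counter]
      constructor
      · intro H k hk
        have := H _ ⟨k, (PySem.Set.mem_ofList _ _).mpr hk, rfl⟩
        simp only [beq_iff_eq, PySem.List.len_eq, List.length_cons] at this
        omega
      · intro H v hv
        rcases hv with ⟨k, hk, rfl⟩
        have hk' := (PySem.Set.mem_ofList _ _).mp hk
        have := H k hk'
        simp only [beq_iff_eq, PySem.List.len_eq, List.length_cons]
        omega
    -- A's condition as a Prop
    have hA : (((first :: rest).map rowKeys).map (fun row =>
          PySem.Set.equal (PySem.Set.ofList row) (PySem.Set.ofList (rowKeys first)))).all id = true ↔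
        (∀ r ∈ rest.map rowKeys, ∀ x, x ∈ r ↔ x ∈ rowKeys first) := by
      simp only [List.all_eq_true, List.map_map, List.mem_map, id_eq, Function.comp]
      constructor
      · intro H r hr x
        rcases hr with ⟨d, hd, rfl⟩
        have := H _ ⟨d, by simp [hd], rfl⟩
        rw [ofList_rowKeys, ofList_rowKeys] at this
        exact (PySem.Set.equal_iff _ _).mp this x
      · intro H b hb
        rcases hb with ⟨d, hd, rfl⟩
        rw [ofList_rowKeys, ofList_rowKeys]
        rcases List.mem_cons.mp hd with e | hd'
        · subst e; exact (PySem.Set.equal_iff _ _).mpr (fun _ => Iff.rfl)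
        · exact (PySem.Set.equal_iff _ _).mpr
            (H (rowKeys d) ⟨d, hd', rfl⟩)
    have hmain := counts_iff (rowKeys first) (rest.map rowKeys)
      (by simpa using hnodup)
    by_cases hc : ∀ r ∈ rest.map rowKeys, ∀ x, x ∈ r ↔ x ∈ rowKeys first
    · rw [if_pos (hA.mpr hc), if_pos (hB.mpr (by simpa using hmain.mpr hc))]
    · rw [if_neg (fun h => hc (hA.mp h)),
        if_neg (fun h => hc (hmain.mp (by simpa using hB.mp h)))]
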